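-- pv_equiv track=rewrite | github.com/curieshicy/My_Utilities_Code | Grokking_the_Coding_Interviews/p58_minimum_difference_element.py | search_min_diff_element
-- ===== SOURCE A (Python) =====
-- def search_min_diff_element(arr, key):
--     if key >= arr[-1]:
--         return arr[-1]
--
--     if key <= arr[0]:
--         return arr[0]
--
--     # find the ceiling of the key
--     # the smallest number in the array that is greater or equal than key
--     l = 0
--     h = len(arr) - 1
--     while l <= h:
--         m = (l + h) // 2
--         if arr[m] == key:
--             return key
--
--         elif arr[m] < key:
--             l = m + 1
--         else:
--             h = m - 1
--
--     if abs(arr[l] - key) > abs(arr[l-1] - key):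
--         return arr[l-1]
--     else:
--         return arr[l]
-- ===== SOURCE B (Python) =====
-- def search_min_diff_element(arr, key):
--     n = len(arr)
--     if key >= arr[n - 1]:
--         return arr[n - 1]
--     if key <= arr[0]:
--         return arr[0]
--
--     # binary search over (offset, size) windows instead of (low, high) bounds;
--     # the window size shrinks to 0, at which point the window's left edge `l`
--     # sits on the ceiling of the key and we pick the closer neighbour.
--     def go(l, size):
--         if size == 0:
--             lo, hi = arr[l - 1], arr[l]
--             return hi if abs(hi - key) <= abs(lo - key) else lo
--         half = (size - 1) // 2
--         m = l + half
--         v = arr[m]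
--         if v == key:
--             return key
--         if v < key:
--             return go(m + 1, size - 1 - half)
--         return go(l, half)
--
--     return go(0, n)
-- ===== Notes on version B (the rewrite author's own statement) =====
-- stated objective: alternative
-- what changed: The while-loop binary search over mutable low/high bounds is replaced by a recursion over (offset, size) windows whose natural-number size is halved each step, with the final closer-neighbour choice expressed as a tie-preferring min instead of A's strict-greater test.
import Mathlib
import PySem

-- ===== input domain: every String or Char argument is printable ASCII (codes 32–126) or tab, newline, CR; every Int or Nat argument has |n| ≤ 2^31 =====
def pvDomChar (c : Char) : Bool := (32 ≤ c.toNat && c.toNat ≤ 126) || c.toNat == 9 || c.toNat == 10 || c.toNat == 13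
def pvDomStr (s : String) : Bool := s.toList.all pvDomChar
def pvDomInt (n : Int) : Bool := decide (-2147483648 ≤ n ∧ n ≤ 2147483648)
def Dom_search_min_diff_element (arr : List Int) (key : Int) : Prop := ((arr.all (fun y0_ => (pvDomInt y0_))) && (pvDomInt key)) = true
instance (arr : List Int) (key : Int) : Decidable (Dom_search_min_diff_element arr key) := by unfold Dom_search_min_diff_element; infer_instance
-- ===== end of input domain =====

-- B replaces A's while-loop binary search over mutable (low, high) Int bounds by a recursion
-- over (offset, size) windows whose Nat size halves each step, and picks the closer neighbour
-- by a tie-preferring ≤ test instead of A's strict > test; same cost, different decomposition.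
-- Indexing: both ports use pyGetD (default 0); under Pre_ (arr ≠ []) every index either
-- program evaluates is in range, so this is exact there.

-- ===== PORT A =====
-- 'while l <= h: …' ported as recursion on the shrinking interval, same state (l, h)
def pvALoop (arr : List Int) (key : Int) (l h : Int) : Int :=
  if l ≤ h then
    if PySem.List.pyGetD arr (PySem.Int.floordiv (l + h) 2) 0 = key then key
    else if PySem.List.pyGetD arr (PySem.Int.floordiv (l + h) 2) 0 < key then
      pvALoop arr key (PySem.Int.floordiv (l + h) 2 + 1) h
    else
      pvALoop arr key l (PySem.Int.floordiv (l + h) 2 - 1)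
  else
    if |PySem.List.pyGetD arr l 0 - key| > |PySem.List.pyGetD arr (l - 1) 0 - key| then
      PySem.List.pyGetD arr (l - 1) 0
    else
      PySem.List.pyGetD arr l 0
termination_by (h + 1 - l).toNat
decreasing_by
  · have := PySem.Int.floordiv_two_mid_bounds (by assumption : l ≤ h)
    omega
  · have := PySem.Int.floordiv_two_mid_bounds (by assumption : l ≤ h)
    omega

def search_min_diff_element (arr : List Int) (key : Int) : Int :=
  if key ≥ PySem.List.pyGetD arr (-1) 0 then PySem.List.pyGetD arr (-1) 0
  else if key ≤ PySem.List.pyGetD arr 0 0 then PySem.List.pyGetD arr 0 0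
  else pvALoop arr key 0 ((arr.length : Int) - 1)

-- ===== PORT B =====
-- Source B's go(l, size): window recursion, size is a Nat destructed to 0 / half
def pvBGo (arr : List Int) (key : Int) (l : Int) (size : Nat) : Int :=
  match size with
  | 0 =>
    let lo := PySem.List.pyGetD arr (l - 1) 0
    let hi := PySem.List.pyGetD arr l 0
    if |hi - key| ≤ |lo - key| then hi else lo
  | Nat.succ s =>
    let half := s / 2          -- (size - 1) // 2
    let m := l + (half : Int)
    let v := PySem.List.pyGetD arr m 0
    if v = key then key
    else if v < key then pvBGo arr key (m + 1) (s - half)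
    else pvBGo arr key l half
termination_by size
decreasing_by
  · omega
  · omega

-- n = len(arr) is written inline as arr.length
def search_min_diff_element_alt (arr : List Int) (key : Int) : Int :=
  if key ≥ PySem.List.pyGetD arr ((arr.length : Int) - 1) 0 then PySem.List.pyGetD arr ((arr.length : Int) - 1) 0
  else if key ≤ PySem.List.pyGetD arr 0 0 then PySem.List.pyGetD arr 0 0
  else pvBGo arr key 0 arr.length

-- ===== PRECONDITION & SPEC =====
-- Pre_ excludes only the empty list, on which A (arr[-1]) raises IndexError.
def Pre_search_min_diff_element (arr : List Int) (key : Int) : Prop := arr ≠ []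
instance (arr : List Int) (key : Int) : Decidable (Pre_search_min_diff_element arr key) := by
  unfold Pre_search_min_diff_element; infer_instance

def pvWitness_search_min_diff_element : List Int × Int := ([1, 4, 6], 5)

def Spec_search_min_diff_element (arr : List Int) (key : Int) (out : Int) : Prop := out = search_min_diff_element_alt arr key
instance (arr : List Int) (key : Int) (out : Int) : Decidable (Spec_search_min_diff_element arr key out) := by unfold Spec_search_min_diff_element; infer_instance

-- ===== CLAIM (what is proved, stated in full; the proofs are below) =====
def Claim_equal_search_min_diff_element : Prop := ∀ (arr : List Int) (key : Int), Dom_search_min_diff_element arr key → Pre_search_min_diff_element arr key → Spec_search_min_diff_element arr key (search_min_diff_element arr key)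

-- ===== LEMMAS AND PROOFS =====

-- the binary-search midpoint (l + (l+t)) // 2 equals l + t/2 (Nat halving)
theorem pvMid_eq (l : Int) (t : Nat) :
    PySem.Int.floordiv (l + (l + (t : Int))) 2 = l + ((t / 2 : Nat) : Int) := by
  rw [PySem.Int.floordiv_eq_ediv_of_pos (by norm_num)]
  omega

-- A's (low, high) loop equals B's (offset, size) recursion when high = low + size - 1
theorem pvALoop_eq_pvBGo (arr : List Int) (key : Int) :
    ∀ (fuel : Nat) (s : Nat) (l : Int), s ≤ fuel →
      pvALoop arr key l (l + (s : Int) - 1) = pvBGo arr key l s := by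
  intro fuel
  induction fuel with
  | zero =>
      intro s l hs
      have hs0 : s = 0 := by omega
      subst hs0
      rw [pvALoop, pvBGo]
      have hle : ¬ l ≤ l + ((0 : Nat) : Int) - 1 := by omega
      rw [if_neg hle]
      by_cases hcmp : |PySem.List.pyGetD arr l 0 - key| ≤ |PySem.List.pyGetD arr (l - 1) 0 - key|
      · rw [if_pos hcmp, if_neg (not_lt.mpr hcmp)]
      · rw [if_neg hcmp, if_pos (lt_of_not_ge hcmp)]
  | succ n ih =>
      intro s l hs
      match s with
      | 0 =>
          rw [pvALoop, pvBGo]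
          have hle : ¬ l ≤ l + ((0 : Nat) : Int) - 1 := by omega
          rw [if_neg hle]
          by_cases hcmp : |PySem.List.pyGetD arr l 0 - key| ≤ |PySem.List.pyGetD arr (l - 1) 0 - key|
          · rw [if_pos hcmp, if_neg (not_lt.mpr hcmp)]
          · rw [if_neg hcmp, if_pos (lt_of_not_ge hcmp)]
      | Nat.succ t =>
          have hh : l + ((t + 1 : Nat) : Int) - 1 = l + (t : Int) := by push_cast; ring
          rw [hh, pvALoop, pvBGo]
          have hle : l ≤ l + (t : Int) := by omega
          rw [if_pos hle, pvMid_eq]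
          by_cases hv : PySem.List.pyGetD arr (l + ((t / 2 : Nat) : Int)) 0 = key
          · rw [if_pos hv, if_pos hv]
          · rw [if_neg hv, if_neg hv]
            by_cases hlt : PySem.List.pyGetD arr (l + ((t / 2 : Nat) : Int)) 0 < key
            · rw [if_pos hlt, if_pos hlt]
              have harg : l + (t : Int) = (l + ((t / 2 : Nat) : Int) + 1) + ((t - t / 2 : Nat) : Int) - 1 := by
                have : t / 2 ≤ t := Nat.div_le_self t 2
                push_cast [this]
                omega
              rw [harg]
              exact ih _ _ (by omega)
            · rw [if_neg hlt, if_neg hlt]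
              have harg : l + ((t / 2 : Nat) : Int) - 1 = l + ((t / 2 : Nat) : Int) - 1 := rfl
              have h2 : pvALoop arr key l (l + ((t / 2 : Nat) : Int) - 1) = pvBGo arr key l (t / 2) :=
                ih _ _ (by omega)
              exact h2

-- A's arr[-1] is B's arr[n-1] on a nonempty list
theorem pvLast_eq (arr : List Int) (h : arr ≠ []) :
    PySem.List.pyGetD arr ((arr.length : Int) - 1) 0 = PySem.List.pyGetD arr (-1) 0 := by
  have hlen : 0 < arr.length := List.length_pos_iff.mpr h
  simp [PySem.List.pyGetD, PySem.List.pyGet?, PySem.List.pyIdx?, Nat.one_le_iff_ne_zero,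
    Nat.pos_iff_ne_zero.mp hlen]

-- ===== VERDICT (by name: the statement is the Claim_ definition above) =====
theorem search_min_diff_element_spec : Claim_equal_search_min_diff_element := by
  intro arr key _ hne
  unfold Spec_search_min_diff_element search_min_diff_element search_min_diff_element_alt
  rw [pvLast_eq arr hne]
  split_ifs
  · rfl
  · rfl
  · have := pvALoop_eq_pvBGo arr key arr.length arr.length 0 (le_refl _)
    simpa using this
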